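-- pv_equiv track=rewrite | github.com/chenxu0602/LeetCode | 401.binary-watch.py | readBinaryWatch
-- ===== SOURCE A (Python) =====
-- from typing import List
--
-- def readBinaryWatch(num: int) -> List[str]:
--
--     """
--     res = []
--     for Hs in range(0, min(num, 4)+1):
--         Ms = num - Hs
--         if not 0 <= Ms <= 6:
--             continue
--
--         hcomb = combinations(range(4), Hs)
--         mcomb = combinations(range(6), Ms)
--
--         hcomb = tuple(map(lambda hs: 0 + sum(2**i for i in hs), hcomb))
--         mcomb = tuple(map(lambda ms: 0 + sum(2**i for i in ms), mcomb))
--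
--         res += ["{}:{:02d}".format(h, m) for h in hcomb for m in mcomb if h < 12 and m < 60]
--
--     return res
--     """
--
--     """
--     up, down = 11, 59
--     up_hash = self.generateHash(up)
--     down_hash = self.generateHash(down)
--
--     n = num
--     result = []
--     while n >= 0:
--         rest = num - n
--         hours = up_hash[n]
--         minutes = down_hash[rest]
--
--         for hour in hours:
--             for minute in minutes:
--                 result.append("%d:%.2d"%(hour, minute))
--
--         n = n - 1
--
--     return result
--     """
--
--     return [str(h) + ':' + '0'*(m<10) + str(m) for h in range(12) for m in range(60) if (bin(m) + bin(h)).count('1') == num]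
-- ===== SOURCE B (Python) =====
-- def readBinaryWatch(num):
--     # Single pass over all ten-bit LED masks (hour bits high, minute bits low);
--     # mask order is exactly (h, m) lexicographic, so no sort is needed.
--     res = []
--     for mask in range(1024):
--         if sum((mask >> i) & 1 for i in range(10)) == num:
--             h, m = mask >> 6, mask & 63
--             if h < 12 and m < 60:
--                 res.append(str(h) + ':' + ('0' if m < 10 else '') + str(m))
--     return res
-- ===== Notes on version B (the rewrite author's own statement) =====
-- stated objective: alternative
-- what changed: Replaces A's nested 12x60 hour/minute scan that popcounts via string bin() concatenation with a single pass over all ten-bit LED masks, counting bits arithmetically with shifts/ands and decoding hour/minute from the mask (mask order is already (h,m)-lexicographic).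
import Mathlib
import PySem

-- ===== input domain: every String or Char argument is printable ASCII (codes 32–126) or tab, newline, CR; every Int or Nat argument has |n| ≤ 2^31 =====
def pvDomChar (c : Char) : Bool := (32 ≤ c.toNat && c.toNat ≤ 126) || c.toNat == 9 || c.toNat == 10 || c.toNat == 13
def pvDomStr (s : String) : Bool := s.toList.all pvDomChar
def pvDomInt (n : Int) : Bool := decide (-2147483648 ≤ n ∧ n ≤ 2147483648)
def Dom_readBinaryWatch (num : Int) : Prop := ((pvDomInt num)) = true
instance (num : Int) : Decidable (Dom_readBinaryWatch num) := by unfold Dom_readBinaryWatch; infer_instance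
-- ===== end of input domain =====

-- B replaces A's 12×60 scan with bin-string popcounts by one pass over all ten-bit
-- LED masks using an arithmetic bit-sum (objective: alternative decomposition).

-- shared formatting: str(h) + ':' + ('0' if m < 10 else '') + str(m)
def pvFmt (h m : Int) : String :=
  PySem.Int.toStr h ++ ":" ++ (if m < 10 then "0" else "") ++ PySem.Int.toStr m

-- ===== PORT A =====
-- A's test: (bin(m) + bin(h)).count('1') == num
def pvCntA (h m : Int) : Int :=
  (PySem.Str.count (PySem.Int.pyBin m ++ PySem.Int.pyBin h) "1" : Int)

-- A: [str(h)+':'+'0'*(m<10)+str(m) for h in range(12) for m in range(60)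
--      if (bin(m)+bin(h)).count('1') == num]
def readBinaryWatch (num : Int) : List String :=
  (PySem.List.pyRange 0 12 1).flatMap (fun h =>
    ((PySem.List.pyRange 0 60 1).filter (fun m => pvCntA h m == num)).map (fun m => pvFmt h m))

-- ===== PORT B =====
-- B's test: sum((mask >> i) & 1 for i in range(10)) == num
def pvBitSum (mask : Int) : Int :=
  (PySem.List.pyRange 0 10 1).foldl (fun s i => s + PySem.Int.band (mask >>> i.toNat) 1) 0

def readBinaryWatch_alt (num : Int) : List String :=
  (PySem.List.pyRange 0 1024 1).foldl
    (fun res mask =>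
      if pvBitSum mask == num then
        if mask >>> (6 : Nat) < 12 ∧ PySem.Int.band mask 63 < 60 then
          res ++ [pvFmt (mask >>> (6 : Nat)) (PySem.Int.band mask 63)]
        else res
      else res)
    []

-- ===== PRECONDITION & SPEC =====
def Spec_readBinaryWatch (num : Int) (out : List String) : Prop := out = readBinaryWatch_alt num
instance (num : Int) (out : List String) : Decidable (Spec_readBinaryWatch num out) := by unfold Spec_readBinaryWatch; infer_instance

-- ===== CLAIM (what is proved, stated in full; the proofs are below) =====
def Claim_equal_readBinaryWatch : Prop := ∀ (num : Int), Dom_readBinaryWatch num → Spec_readBinaryWatch num (readBinaryWatch num)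

-- ===== LEMMAS AND PROOFS =====

-- the mask-indexed emission both programs boil down to
def pvG (num h m : Int) : List String :=
  if pvBitSum (h * 64 + m) = num ∧ (h < 12 ∧ m < 60) then [pvFmt h m] else []

theorem pvFlatMap_congr {α β : Type} {l : List α} {f g : α → List β}
    (h : ∀ x ∈ l, f x = g x) : l.flatMap f = l.flatMap g := by
  induction l with
  | nil => rfl
  | cons a t ih =>
      simp only [List.flatMap_cons, h a (by simp)]
      rw [ih (fun x hx => h x (by simp [hx]))]

theorem pvFilterMap_flat {α β : Type} (l : List α) (p : α → Bool) (f : α → β) :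
    (l.filter p).map f = l.flatMap (fun x => if p x then [f x] else []) := by
  induction l with
  | nil => rfl
  | cons a t ih => by_cases hp : p a <;> simp [hp, ih]

theorem pvB_fold (num : Int) (l : List Int) (acc : List String) :
    l.foldl
      (fun res mask =>
        if pvBitSum mask == num then
          if mask >>> (6 : Nat) < 12 ∧ PySem.Int.band mask 63 < 60 then
            res ++ [pvFmt (mask >>> (6 : Nat)) (PySem.Int.band mask 63)]
          else res
        else res)
      acc
    = acc ++ l.flatMap (fun mask =>
        if pvBitSum mask = num ∧ (mask >>> (6 : Nat) < 12 ∧ PySem.Int.band mask 63 < 60) then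
          [pvFmt (mask >>> (6 : Nat)) (PySem.Int.band mask 63)]
        else []) := by
  induction l generalizing acc with
  | nil => simp
  | cons a t ih =>
      simp only [List.foldl_cons, List.flatMap_cons, ih]
      split_ifs with h1 h2 h3 h4 h5 <;>
        simp_all [beq_iff_eq]

set_option maxRecDepth 8000 in
theorem pvRange_split :
    PySem.List.pyRange 0 1024 1 =
      (PySem.List.pyRange 0 16 1).flatMap
        (fun h => (PySem.List.pyRange 0 64 1).map (fun m => h * 64 + m)) := by decide

set_option maxHeartbeats 1000000 in
theorem pvDecode :
    ∀ h ∈ PySem.List.pyRange 0 16 1, ∀ m ∈ PySem.List.pyRange 0 64 1,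
      (h * 64 + m) >>> (6 : Nat) = h ∧ PySem.Int.band (h * 64 + m) 63 = m := by decide

set_option maxHeartbeats 4000000 in
set_option maxRecDepth 8000 in
theorem pvCnt_eq :
    ∀ h ∈ PySem.List.pyRange 0 12 1, ∀ m ∈ PySem.List.pyRange 0 60 1,
      pvBitSum (h * 64 + m) = pvCntA h m := by decide

-- ===== VERDICT (by name: the statement is the Claim_ definition above) =====
theorem readBinaryWatch_spec : Claim_equal_readBinaryWatch := by
  intro num _
  unfold Spec_readBinaryWatch readBinaryWatch readBinaryWatch_alt
  rw [pvB_fold, List.nil_append, pvRange_split, List.flatMap_assoc]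
  have hB : ∀ h ∈ PySem.List.pyRange 0 16 1,
      ((PySem.List.pyRange 0 64 1).map (fun m => h * 64 + m)).flatMap
        (fun mask =>
          if pvBitSum mask = num ∧ (mask >>> (6 : Nat) < 12 ∧ PySem.Int.band mask 63 < 60) then
            [pvFmt (mask >>> (6 : Nat)) (PySem.Int.band mask 63)]
          else [])
      = (PySem.List.pyRange 0 64 1).flatMap (fun m => pvG num h m) := by
    intro h hh
    rw [List.flatMap_map]
    exact pvFlatMap_congr (fun m hm => by
      obtain ⟨hd1, hd2⟩ := pvDecode h hh m hm
      simp only [pvG, hd1, hd2])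
  rw [pvFlatMap_congr hB]
  -- drop the h ∈ [12,16) and m ∈ [60,64) slices: pvG is [] there
  rw [show (16 : Int) = 16 from rfl,
      PySem.List.pyRange_one_append 0 12 16 (by norm_num) (by norm_num),
      List.flatMap_append]
  have h12 : (PySem.List.pyRange 12 16 1).flatMap
      (fun h => (PySem.List.pyRange 0 64 1).flatMap (fun m => pvG num h m)) = [] := by
    rw [List.flatMap_eq_nil_iff]
    intro h hh
    rw [List.flatMap_eq_nil_iff]
    intro m _
    have := (PySem.List.mem_pyRange_one.mp hh).1
    simp only [pvG, if_neg (by omega : ¬(pvBitSum (h * 64 + m) = num ∧ (h < 12 ∧ m < 60)))]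
  rw [h12, List.append_nil]
  have hSlice : ∀ h ∈ PySem.List.pyRange 0 12 1,
      (PySem.List.pyRange 0 64 1).flatMap (fun m => pvG num h m)
      = ((PySem.List.pyRange 0 60 1).filter (fun m => pvCntA h m == num)).map
          (fun m => pvFmt h m) := by
    intro h hh
    have hhlt := (PySem.List.mem_pyRange_one.mp hh).2
    rw [PySem.List.pyRange_one_append 0 60 64 (by norm_num) (by norm_num), List.flatMap_append]
    have h60 : (PySem.List.pyRange 60 64 1).flatMap (fun m => pvG num h m) = [] := by
      rw [List.flatMap_eq_nil_iff]
      intro m hm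
      have := (PySem.List.mem_pyRange_one.mp hm).1
      simp only [pvG, if_neg (by omega : ¬(pvBitSum (h * 64 + m) = num ∧ (h < 12 ∧ m < 60)))]
    rw [h60, List.append_nil, pvFilterMap_flat]
    exact pvFlatMap_congr (fun m hm => by
      have hmlt := (PySem.List.mem_pyRange_one.mp hm).2
      have hce := pvCnt_eq h hh m hm
      by_cases hc : pvCntA h m = num <;> simp [pvG, hce, hc, hhlt, hmlt])
  exact (pvFlatMap_congr hSlice).symm
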